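-- pv_equiv track=rewrite | github.com/facebookincubator/AITemplate | python/aitemplate/backend/cuda/softmax/softmax.py | find_tile_size
-- ===== SOURCE A (Python) =====
-- def find_tile_size(k: int) -> int:
--     """
--     Find the smalled m that would make m * k multiples of 8.
--     For odd k, only apply for k <= 5
--     """
--     m = 1 if k > 1 else 8
--     for i in (1, 2, 4, 8):
--         if (k * i) % 8 == 0:
--             m = i
--             break
--     if k % 2 == 1 and k >= 7:
--         m = 1
--     return m
-- ===== SOURCE B (Python) =====
-- import math
--
-- def find_tile_size(k: int) -> int:
--     # smallest power-of-two multiplier m in {1,2,4,8} with (k*m) % 8 == 0,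
--     # computed in closed form: m = 8 // gcd(8, k)
--     m = 8 // math.gcd(8, k)
--     if k % 2 == 1 and k >= 7:
--         m = 1
--     return m
-- ===== Notes on version B (the rewrite author's own statement) =====
-- stated objective: simpler
-- what changed: Replaces the trial loop over (1,2,4,8) (with its unused pre-loop sentinel) by the closed form m = 8 // gcd(8, k), keeping the odd-k>=7 override.
import Mathlib
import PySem

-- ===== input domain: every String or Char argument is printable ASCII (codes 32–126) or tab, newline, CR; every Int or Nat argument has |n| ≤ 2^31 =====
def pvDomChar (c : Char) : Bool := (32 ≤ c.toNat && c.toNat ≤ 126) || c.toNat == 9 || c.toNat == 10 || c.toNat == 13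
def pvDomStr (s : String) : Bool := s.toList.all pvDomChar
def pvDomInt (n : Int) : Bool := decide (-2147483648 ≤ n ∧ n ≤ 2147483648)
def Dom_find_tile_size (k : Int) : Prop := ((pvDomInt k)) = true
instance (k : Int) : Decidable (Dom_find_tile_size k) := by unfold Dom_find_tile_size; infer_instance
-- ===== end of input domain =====

-- B replaces A's trial loop over (1, 2, 4, 8) by the closed form m = 8 // gcd(8, k); same result, simpler.

-- ===== PORT A =====
-- the 'for i in (1, 2, 4, 8): … break' loop of A
def ftsLoop (k : Int) : List Int → Int → Int
  | [], m => m
  | i :: rest, m => if PySem.Int.mod (k * i) 8 = 0 then i else ftsLoop k rest m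

def find_tile_size (k : Int) : Int :=
  let m : Int := if k > 1 then 1 else 8
  let m := ftsLoop k [1, 2, 4, 8] m
  if PySem.Int.mod k 2 = 1 ∧ k ≥ 7 then 1 else m

-- ===== PORT B =====
def find_tile_size_alt (k : Int) : Int :=
  let m : Int := PySem.Int.floordiv 8 (Int.gcd 8 k)   -- math.gcd(8, k) is the nonnegative gcd
  if PySem.Int.mod k 2 = 1 ∧ k ≥ 7 then 1 else m

-- ===== PRECONDITION & SPEC =====
def Spec_find_tile_size (k : Int) (out : Int) : Prop := out = find_tile_size_alt k
instance (k : Int) (out : Int) : Decidable (Spec_find_tile_size k out) := by unfold Spec_find_tile_size; infer_instance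

-- ===== CLAIM (what is proved, stated in full; the proofs are below) =====
def Claim_equal_find_tile_size : Prop := ∀ (k : Int), Dom_find_tile_size k → Spec_find_tile_size k (find_tile_size k)

-- ===== LEMMAS AND PROOFS =====
-- A's loop always breaks (at i = 8 at the latest), and its result is 8 // gcd(8, k),
-- independently of the initial value of m.
lemma ftsLoop_closed (k init : Int) :
    ftsLoop k [1, 2, 4, 8] init = PySem.Int.floordiv 8 (Int.gcd 8 k) := by
  obtain ⟨q, r, hr0, hr8, hk⟩ : ∃ q r : Int, 0 ≤ r ∧ r < 8 ∧ k = r + q * 8 :=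
    ⟨k / 8, k % 8, Int.emod_nonneg k (by norm_num), by omega, by omega⟩
  subst hk
  simp only [ftsLoop, PySem.Int.mod_eq_zero_iff_dvd, Int.gcd_add_mul_right_right]
  interval_cases r <;> norm_num <;> split_ifs <;> first | rfl | omega

lemma ports_agree (k : Int) : find_tile_size k = find_tile_size_alt k := by
  simp only [find_tile_size, find_tile_size_alt, ftsLoop_closed]

-- ===== VERDICT (by name: the statement is the Claim_ definition above) =====
theorem find_tile_size_spec : Claim_equal_find_tile_size := by
  intro k _
  exact ports_agree k
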